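-- pv_equiv track=rewrite | github.com/Yuuraa/Python-Algorithm | Leetcode/202001/most_competitive_subseq.py | mostCompetitive_bad
-- ===== SOURCE A (Python) =====
-- def mostCompetitive_bad(nums, k):
--     n, left, ans = len(nums), 0, []
--     limit = n - k + 1
--
--     if k == 1: return [min(nums)]
--     if k == n: return nums
--
--     while len(ans) < k:
--         next_ans = min(nums[left:limit])
--         left += nums[left:limit].index(next_ans) + 1
--         limit += 1
--         ans.append(next_ans)
--
--     return ans
-- ===== SOURCE B (Python) =====
-- def mostCompetitive_bad(nums, k):
--     # Monotonic stack: pop a larger top while enough elements remain to still reach length k.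
--     stack = []
--     rem = len(nums)
--     for x in nums:
--         rem -= 1
--         while stack and stack[-1] > x and len(stack) + rem >= k:
--             stack.pop()
--         if len(stack) < k:
--             stack.append(x)
--     return stack
-- ===== Notes on version B (the rewrite author's own statement) =====
-- stated objective: faster
-- what changed: Replaced A's repeated min()+index() scans over a sliding window (one full window scan per output element) by a single left-to-right pass with a monotonic stack that pops a larger top while enough elements remain to still fill k slots.
import Mathlib
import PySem

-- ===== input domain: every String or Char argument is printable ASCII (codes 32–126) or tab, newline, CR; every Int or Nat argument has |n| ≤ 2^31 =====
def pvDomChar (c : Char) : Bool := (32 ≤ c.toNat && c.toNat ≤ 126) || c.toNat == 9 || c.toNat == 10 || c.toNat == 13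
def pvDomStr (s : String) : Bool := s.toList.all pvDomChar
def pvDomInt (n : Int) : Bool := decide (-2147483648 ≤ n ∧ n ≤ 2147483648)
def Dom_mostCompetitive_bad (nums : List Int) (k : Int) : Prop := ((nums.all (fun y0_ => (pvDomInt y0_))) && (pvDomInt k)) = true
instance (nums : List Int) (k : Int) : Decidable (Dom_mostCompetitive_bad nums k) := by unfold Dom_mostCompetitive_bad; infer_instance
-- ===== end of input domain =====

-- B replaces A's per-output-element min()+index() window scans by one monotonic-stack pass (faster: O(n*k) → O(n)).

-- ===== PORT A =====
-- A's while loop: each iteration appends exactly one element to ans, so the loop runs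
-- (k - len(ans)) times; fuel k.toNat is exactly that bound, the len(ans) < k test is kept.
-- The `none` branch of min? is Python's ValueError on an empty slice (excluded by Pre_).
def mcLoopA (nums : List Int) (k : Int) : Nat → Int → Int → List Int → List Int
  | 0, _, _, ans => ans
  | fuel + 1, left, limit, ans =>
    if (ans.length : Int) < k then
      match PySem.List.min? (PySem.List.slice nums (some left) (some limit)) (fun x => x) with
      | none => ans  -- ValueError: min of empty slice (outside Pre_)
      | some nextAns =>
        mcLoopA nums k fuel
          (left + (((PySem.List.index? (PySem.List.slice nums (some left) (some limit)) nextAns).getD 0 : Nat) : Int) + 1)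
          (limit + 1) (ans ++ [nextAns])
    else ans

def mostCompetitive_bad (nums : List Int) (k : Int) : List Int :=
  let n : Int := PySem.List.len nums
  let limit : Int := n - k + 1
  if k = 1 then
    match PySem.List.min? nums (fun x => x) with
    | none => []  -- ValueError: min of empty list (outside Pre_)
    | some m => [m]
  else if k = n then nums
  else mcLoopA nums k k.toNat 0 limit []

-- ===== PORT B =====
-- stack is kept top-at-head (Python appends/pops at the right end); reversed once at the end.
def mcPop (k rem x : Int) : List Int → List Int
  | [] => []
  | t :: s => if t > x ∧ (((t :: s).length : Int) + rem ≥ k) then mcPop k rem x s else t :: s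

def mcStep (k rem : Int) (stack : List Int) (x : Int) : List Int :=
  let s := mcPop k rem x stack
  if (s.length : Int) < k then x :: s else s

def mcLoopB (k : Int) : List Int → Int → List Int → List Int
  | [], _, stack => stack
  | x :: rest, rem, stack => mcLoopB k rest (rem - 1) (mcStep k (rem - 1) stack x)

def mostCompetitive_bad_alt (nums : List Int) (k : Int) : List Int :=
  (mcLoopB k nums (PySem.List.len nums) []).reverse

-- ===== PRECONDITION & SPEC =====
-- Pre_ excludes exactly the inputs where A raises: k > len(nums) (min() of an empty slice → ValueError).
def Pre_mostCompetitive_bad (nums : List Int) (k : Int) : Prop := k ≤ (nums.length : Int)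
instance (nums : List Int) (k : Int) : Decidable (Pre_mostCompetitive_bad nums k) := by unfold Pre_mostCompetitive_bad; infer_instance
def pvWitness_mostCompetitive_bad : List Int × Int := ([3, 1, 2], 2)

def Spec_mostCompetitive_bad (nums : List Int) (k : Int) (out : List Int) : Prop := out = mostCompetitive_bad_alt nums k
instance (nums : List Int) (k : Int) (out : List Int) : Decidable (Spec_mostCompetitive_bad nums k out) := by unfold Spec_mostCompetitive_bad; infer_instance

-- ===== CLAIM (what is proved, stated in full; the proofs are below) =====
def Claim_equal_mostCompetitive_bad : Prop := ∀ (nums : List Int) (k : Int), Dom_mostCompetitive_bad nums k → Pre_mostCompetitive_bad nums k → Spec_mostCompetitive_bad nums k (mostCompetitive_bad nums k)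

-- ===== LEMMAS AND PROOFS =====

-- The common specification both programs compute: the greedy of A, one picked minimum per step.
def mcGreedy : Nat → List Int → List Int
  | 0, _ => []
  | f + 1, l =>
    match PySem.List.min? (l.take (l.length - f)) (fun x => x) with
    | none => []
    | some m => m :: mcGreedy f (l.drop (((PySem.List.index? (l.take (l.length - f)) m).getD 0) + 1))

-- proof-side view of B's loop: rem expressed as remaining-list length plus a fixed tail size e
def mcRunE (k : Int) (e : Nat) : List Int → List Int → List Int
  | s, [] => s
  | s, x :: rest => mcRunE k e (mcStep k (((rest.length + e : Nat) : Int)) s x) rest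

lemma mcLoopB_eq_runE (k : Int) : ∀ (l : List Int) (e : Nat) (rem : Int) (s : List Int),
    rem = ((l.length + e : Nat) : Int) → mcLoopB k l rem s = mcRunE k e s l := by
  intro l
  induction l with
  | nil => intro e rem s _; simp [mcLoopB, mcRunE]
  | cons x rest ih =>
    intro e rem s hrem
    have h1 : rem - 1 = ((rest.length + e : Nat) : Int) := by
      rw [hrem]; push_cast [List.length_cons]; ring
    simp only [mcLoopB, mcRunE, h1]
    exact ih e _ _ rfl

lemma mcRunE_append (k : Int) (e : Nat) (l2 : List Int) : ∀ (l1 : List Int) (s : List Int),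
    mcRunE k e s (l1 ++ l2) = mcRunE k e (mcRunE k (l2.length + e) s l1) l2 := by
  intro l1
  induction l1 with
  | nil => intro s; simp [mcRunE]
  | cons x rest ih =>
    intro s
    have h1 : ((rest ++ l2).length + e : Nat) = (rest.length + (l2.length + e) : Nat) := by
      simp [List.length_append]; omega
    simp only [List.cons_append, mcRunE, h1]
    exact ih _

lemma mcRunE_single (k : Int) (e : Nat) (s : List Int) (x : Int) :
    mcRunE k e s [x] = mcStep k ((e : Nat) : Int) s x := by
  simp [mcRunE]

lemma mcRunE_nonpos (k : Int) (hk : k ≤ 0) (e : Nat) : ∀ l : List Int, mcRunE k e [] l = [] := by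
  intro l
  induction l with
  | nil => simp [mcRunE]
  | cons x rest ih =>
    have hs : mcStep k (((rest.length + e : Nat) : Int)) [] x = [] := by
      simp only [mcStep, mcPop]
      rw [if_neg]
      simp only [List.length_nil]
      omega
    simp only [mcRunE, hs]
    exact ih

lemma mem_mcPop {y : Int} (k rem x : Int) : ∀ s : List Int, y ∈ mcPop k rem x s → y ∈ s := by
  intro s
  induction s with
  | nil => simp [mcPop]
  | cons t s ih =>
    simp only [mcPop]
    split_ifs with h
    · intro hy; exact List.mem_cons_of_mem _ (ih hy)
    · exact fun hy => hy

lemma mem_mcStep {y : Int} (k rem : Int) (s : List Int) (x : Int) :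
    y ∈ mcStep k rem s x → y = x ∨ y ∈ s := by
  simp only [mcStep]
  split_ifs with h
  · intro hy
    rcases List.mem_cons.mp hy with h1 | h1
    · exact Or.inl h1
    · exact Or.inr (mem_mcPop _ _ _ _ h1)
  · intro hy; exact Or.inr (mem_mcPop _ _ _ _ hy)

lemma mem_mcRunE {y : Int} (k : Int) (e : Nat) : ∀ (l s : List Int),
    y ∈ mcRunE k e s l → y ∈ s ∨ y ∈ l := by
  intro l
  induction l with
  | nil => intro s h; exact Or.inl h
  | cons x rest ih =>
    intro s h
    rcases ih _ h with h1 | h1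
    · rcases mem_mcStep _ _ _ _ h1 with h2 | h2
      · exact Or.inr (by simp [h2])
      · exact Or.inl h2
    · exact Or.inr (List.mem_cons_of_mem _ h1)

lemma mcPop_eq_nil (k rem x : Int) : ∀ s : List Int,
    (∀ t ∈ s, x < t) → k ≤ 1 + rem → mcPop k rem x s = [] := by
  intro s hs hk
  induction s with
  | nil => simp [mcPop]
  | cons t s ih =>
    simp only [mcPop]
    rw [if_pos]
    · exact ih (fun u hu => hs u (List.mem_cons_of_mem _ hu))
    · refine ⟨hs t (List.mem_cons_self), ?_⟩
      simp only [List.length_cons]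
      push_cast
      omega

lemma mcStep_all_gt (k rem x : Int) (s : List Int)
    (hk : k ≤ 1 + rem) (hk0 : 0 < k) (hs : ∀ t ∈ s, x < t) :
    mcStep k rem s x = [x] := by
  simp only [mcStep, mcPop_eq_nil k rem x s hs hk]
  rw [if_pos]
  simp only [List.length_nil]
  omega

lemma mcPop_append (f : Nat) (rem x m : Int) (hg : ¬(x < m ∧ (f : Int) + 1 ≤ 1 + rem)) :
    ∀ s : List Int, mcPop ((f : Int) + 1) rem x (s ++ [m]) = mcPop (f : Int) rem x s ++ [m] := by
  intro s
  induction s with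
  | nil =>
    simp only [List.nil_append, mcPop]
    rw [if_neg]
    intro h
    exact hg ⟨h.1, by have := h.2; simp only [List.length_cons, List.length_nil] at this; push_cast at this ⊢; omega⟩
  | cons t s ih =>
    simp only [List.cons_append, mcPop]
    by_cases h : x < t ∧ ((s.length : Int) + 1 + rem ≥ (f : Int))
    · rw [if_pos, if_pos]
      · exact ih
      · refine ⟨h.1, ?_⟩
        simp only [List.length_cons]
        push_cast
        omega
      · refine ⟨h.1, ?_⟩
        simp only [List.length_cons, List.length_append, List.length_nil]
        push_cast
        omega
    · have hc1 : ¬(t > x ∧ ((t :: (s ++ [m])).length : Int) + rem ≥ (f : Int) + 1) := by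
        intro hc
        refine h ⟨hc.1, ?_⟩
        have := hc.2
        simp only [List.length_cons, List.length_append, List.length_nil] at this
        push_cast at this
        omega
      have hc2 : ¬(t > x ∧ ((t :: s).length : Int) + rem ≥ (f : Int)) := by
        intro hc
        refine h ⟨hc.1, ?_⟩
        have := hc.2
        simp only [List.length_cons] at this
        push_cast at this
        omega
      rw [if_neg hc1, if_neg hc2]
      simp

lemma mcStep_append (f : Nat) (rem x m : Int) (hg : ¬(x < m ∧ (f : Int) + 1 ≤ 1 + rem)) (s : List Int) :
    mcStep ((f : Int) + 1) rem (s ++ [m]) x = mcStep (f : Int) rem s x ++ [m] := by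
  simp only [mcStep, mcPop_append f rem x m hg s]
  by_cases h : ((mcPop (f : Int) rem x s).length : Int) < (f : Int)
  · rw [if_pos, if_pos h]
    · rfl
    · simp only [List.length_append, List.length_cons, List.length_nil]
      push_cast
      omega
  · rw [if_neg, if_neg h]
    simp only [List.length_append, List.length_cons, List.length_nil]
    push_cast
    omega

lemma mcRunE_shift (f : Nat) (m : Int) : ∀ (rest s : List Int),
    (∀ y ∈ rest.take (rest.length - f), m ≤ y) →
    mcRunE ((f : Int) + 1) 0 (s ++ [m]) rest = mcRunE (f : Int) 0 s rest ++ [m] := by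
  intro rest
  induction rest with
  | nil => intro s _; simp [mcRunE]
  | cons x rest ih =>
    intro s hH
    have hg : ¬(x < m ∧ (f : Int) + 1 ≤ 1 + ((rest.length + 0 : Nat) : Int)) := by
      by_cases hf : f ≤ rest.length
      · have hx : x ∈ (x :: rest).take ((x :: rest).length - f) := by
          have : (x :: rest).length - f = (rest.length - f) + 1 := by
            simp only [List.length_cons]; omega
          rw [this, List.take_succ_cons]
          exact List.mem_cons_self
        have := hH x hx
        intro hc
        omega
      · intro hc
        have := hc.2
        push_cast at this
        omega
    have hH' : ∀ y ∈ rest.take (rest.length - f), m ≤ y := by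
      by_cases hf : f ≤ rest.length
      · intro y hy
        apply hH
        have : (x :: rest).length - f = (rest.length - f) + 1 := by
          simp only [List.length_cons]; omega
        rw [this, List.take_succ_cons]
        exact List.mem_cons_of_mem _ hy
      · intro y hy
        have : rest.length - f = 0 := by omega
        rw [this] at hy
        simp at hy
    simp only [mcRunE, mcStep_append f _ x m hg s]
    exact ih _ hH'

-- ===== B = greedy =====
theorem runE_eq_greedy : ∀ (f : Nat) (l : List Int), f ≤ l.length →
    mcRunE (f : Int) 0 [] l = (mcGreedy f l).reverse := by
  intro f
  induction f with
  | zero =>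
    intro l _
    simp only [Nat.cast_zero]
    rw [mcRunE_nonpos 0 le_rfl 0 l]
    simp [mcGreedy]
  | succ f ih =>
    intro l hf
    have hwlen : (l.take (l.length - f)).length = l.length - f := by
      simp only [List.length_take]
      omega
    have hwne : l.take (l.length - f) ≠ [] := by
      intro h
      rw [h] at hwlen
      simp only [List.length_nil] at hwlen
      omega
    obtain ⟨m, hmin⟩ : ∃ m, PySem.List.min? (l.take (l.length - f)) (fun x => x) = some m := by
      cases hm : PySem.List.min? (l.take (l.length - f)) (fun x => x) with
      | none => exact absurd ((PySem.List.min?_eq_none_iff _ _).mp hm) hwne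
      | some m => exact ⟨m, rfl⟩
    have hmmem : m ∈ l.take (l.length - f) := PySem.List.min?_mem hmin
    have hmle : ∀ y ∈ l.take (l.length - f), m ≤ y := PySem.List.min?_isMin hmin
    obtain ⟨j, hidx⟩ : ∃ j, PySem.List.index? (l.take (l.length - f)) m = some j := by
      have h1 := (PySem.List.index?_isSome_iff (l.take (l.length - f)) m).mpr hmmem
      cases h : PySem.List.index? (l.take (l.length - f)) m with
      | none => rw [h] at h1; simp at h1
      | some j => exact ⟨j, rfl⟩
    obtain ⟨hj, hwj, hjfirst⟩ := PySem.List.getElem_of_index?_eq_some hidx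
    have hjn : j < l.length - f := by rwa [hwlen] at hj
    have hjl : j < l.length := by omega
    have hlj : l[j] = m := by
      rw [← hwj]
      simp [List.getElem_take]
    have htake : l.take (j + 1) = l.take j ++ [m] := by
      rw [List.take_add_one]
      congr 1
      rw [List.getElem?_eq_getElem hjl, hlj]
      rfl
    have hgt : ∀ y ∈ l.take j, m < y := by
      intro y hy
      obtain ⟨i, hi, hiy⟩ := List.getElem_of_mem hy
      have hij : i < j := by
        have := hi
        simp only [List.length_take] at this
        omega
      have hiw : i < (l.take (l.length - f)).length := by omega
      have hil : i < l.length := by omega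
      have h1 : (l.take j)[i]'hi = l[i] := by simp [List.getElem_take]
      have h2 : (l.take (l.length - f))[i]'hiw = l[i] := by simp [List.getElem_take]
      have hne : (l.take (l.length - f))[i]'hiw ≠ m := hjfirst i hij
      have hle : m ≤ (l.take (l.length - f))[i]'hiw := hmle _ (List.getElem_mem hiw)
      rw [h2] at hne hle
      rw [← hiy, h1]
      omega
    have hrestlen : (l.drop (j + 1)).length = l.length - (j + 1) := by simp
    have h1 : mcRunE ((f + 1 : Nat) : Int) 0 [] l
        = mcRunE ((f + 1 : Nat) : Int) 0
            (mcRunE ((f + 1 : Nat) : Int) ((l.drop (j + 1)).length + 0) [] (l.take (j + 1)))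
            (l.drop (j + 1)) := by
      conv_lhs => rw [← List.take_append_drop (j + 1) l]
      rw [mcRunE_append]
    have h2 : mcRunE ((f + 1 : Nat) : Int) ((l.drop (j + 1)).length + 0) [] (l.take (j + 1)) = [m] := by
      rw [htake, mcRunE_append, mcRunE_single]
      apply mcStep_all_gt
      · push_cast
        omega
      · push_cast
        omega
      · intro t ht
        rcases mem_mcRunE _ _ _ _ ht with h | h
        · simp at h
        · exact hgt t h
    have h3 : mcRunE ((f + 1 : Nat) : Int) 0 [m] (l.drop (j + 1))
        = mcRunE (f : Int) 0 [] (l.drop (j + 1)) ++ [m] := by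
      have hK : ((f + 1 : Nat) : Int) = (f : Int) + 1 := by push_cast; ring
      rw [hK]
      have hH : ∀ y ∈ (l.drop (j + 1)).take ((l.drop (j + 1)).length - f), m ≤ y := by
        intro y hy
        obtain ⟨i, hi, hiy⟩ := List.getElem_of_mem hy
        have hi1 : i < (l.drop (j + 1)).length - f := by
          have := hi
          simp only [List.length_take] at this
          omega
        have hi2 : i < (l.drop (j + 1)).length := by omega
        have hidx2 : j + 1 + i < l.length := by
          have := hrestlen
          omega
        have hidx3 : j + 1 + i < l.length - f := by
          have := hrestlen
          omega
        have hA : ((l.drop (j + 1)).take ((l.drop (j + 1)).length - f))[i]'hi = (l.drop (j + 1))[i]'hi2 := by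
          simp [List.getElem_take]
        have hB : (l.drop (j + 1))[i]'hi2 = l[j + 1 + i]'hidx2 := by
          simp [List.getElem_drop]
        have hC : l[j + 1 + i]'hidx2 ∈ l.take (l.length - f) := by
          have hw : (l.take (l.length - f))[j + 1 + i]'(by omega : j + 1 + i < (l.take (l.length - f)).length) = l[j + 1 + i]'hidx2 := by
            simp [List.getElem_take]
          rw [← hw]
          exact List.getElem_mem _
        rw [← hiy, hA, hB]
        exact hmle _ hC
      have := mcRunE_shift f m (l.drop (j + 1)) [] hH
      simpa using this
    have hg : mcGreedy (f + 1) l = m :: mcGreedy f (l.drop (j + 1)) := by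
      show (match PySem.List.min? (l.take (l.length - f)) (fun x => x) with
        | none => []
        | some m => m :: mcGreedy f (l.drop (((PySem.List.index? (l.take (l.length - f)) m).getD 0) + 1))) = _
      rw [hmin]
      simp only [hidx, Option.getD_some]
    have hih : mcRunE (f : Int) 0 [] (l.drop (j + 1)) = (mcGreedy f (l.drop (j + 1))).reverse := by
      apply ih
      omega
    rw [h1, h2, h3, hih, hg, List.reverse_cons]

-- ===== A = greedy =====
lemma mcGreedy_full : ∀ l : List Int, mcGreedy l.length l = l := by
  intro l
  induction l with
  | nil => simp [mcGreedy]
  | cons x t ih =>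
    have h1 : (x :: t).length = t.length + 1 := by simp
    rw [h1]
    have h2 : (x :: t).length - t.length = 1 := by simp
    show (match PySem.List.min? ((x :: t).take ((x :: t).length - t.length)) (fun y => y) with
      | none => []
      | some m => m :: mcGreedy t.length ((x :: t).drop (((PySem.List.index? ((x :: t).take ((x :: t).length - t.length)) m).getD 0) + 1))) = x :: t
    rw [h2]
    have h3 : (x :: t).take 1 = [x] := by simp
    rw [h3, PySem.List.min?_id_cons]
    simp only [List.foldl_nil, PySem.List.index?_cons_self, Option.getD_some, Nat.zero_add,
      List.drop_succ_cons, List.drop_zero]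
    rw [ih]

lemma mcLoopA_eq_greedy (nums : List Int) (k : Int) : ∀ (fuel left : Nat) (ans : List Int),
    left + fuel ≤ nums.length →
    (ans.length : Int) + (fuel : Int) = k →
    mcLoopA nums k fuel (left : Int) ((nums.length : Int) - (fuel : Int) + 1) ans
      = ans ++ mcGreedy fuel (nums.drop left) := by
  intro fuel
  induction fuel with
  | zero => intro left ans _ _; simp [mcLoopA, mcGreedy]
  | succ fuel ih =>
    intro left ans hle hk
    have hcond : (ans.length : Int) < k := by push_cast at hk ⊢; omega
    have hlim : (nums.length : Int) - ((fuel + 1 : Nat) : Int) + 1 = ((nums.length - fuel : Nat) : Int) := by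
      push_cast
      omega
    have hslice : PySem.List.slice nums (some (left : Int)) (some ((nums.length : Int) - ((fuel + 1 : Nat) : Int) + 1))
        = (nums.drop left).take ((nums.drop left).length - fuel) := by
      rw [hlim, PySem.List.slice_natCast]
      congr 1
      simp only [List.length_drop]
      omega
    set s : List Int := nums.drop left with hs
    have hslen : s.length = nums.length - left := by simp [hs]
    have hwlen : (s.take (s.length - fuel)).length = s.length - fuel := by
      simp only [List.length_take]
      omega
    have hwne : s.take (s.length - fuel) ≠ [] := by
      intro h
      rw [h] at hwlen
      simp only [List.length_nil] at hwlen
      omega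
    obtain ⟨m, hmin⟩ : ∃ m, PySem.List.min? (s.take (s.length - fuel)) (fun x => x) = some m := by
      cases hm : PySem.List.min? (s.take (s.length - fuel)) (fun x => x) with
      | none => exact absurd ((PySem.List.min?_eq_none_iff _ _).mp hm) hwne
      | some m => exact ⟨m, rfl⟩
    obtain ⟨j, hidx⟩ : ∃ j, PySem.List.index? (s.take (s.length - fuel)) m = some j := by
      have h1 := (PySem.List.index?_isSome_iff (s.take (s.length - fuel)) m).mpr (PySem.List.min?_mem hmin)
      cases h : PySem.List.index? (s.take (s.length - fuel)) m with
      | none => rw [h] at h1; simp at h1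
      | some j => exact ⟨j, rfl⟩
    obtain ⟨hj, _, _⟩ := PySem.List.getElem_of_index?_eq_some hidx
    have hjlt : j < s.length - fuel := by rwa [hwlen] at hj
    have hstep : mcLoopA nums k (fuel + 1) (left : Int) ((nums.length : Int) - ((fuel + 1 : Nat) : Int) + 1) ans
        = mcLoopA nums k fuel ((left : Int) + (j : Int) + 1)
            (((nums.length : Int) - ((fuel + 1 : Nat) : Int) + 1) + 1) (ans ++ [m]) := by
      simp only [mcLoopA, if_pos hcond, hslice, hmin, hidx, Option.getD_some]
    have harg1 : (left : Int) + (j : Int) + 1 = ((left + j + 1 : Nat) : Int) := by push_cast; ring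
    have harg2 : ((nums.length : Int) - ((fuel + 1 : Nat) : Int) + 1) + 1
        = (nums.length : Int) - (fuel : Int) + 1 := by push_cast; ring
    rw [hstep, harg1, harg2, ih (left + j + 1) (ans ++ [m]) (by omega) (by simp only [List.length_append, List.length_cons, List.length_nil]; push_cast at hk ⊢; omega)]
    have hgreedy : mcGreedy (fuel + 1) s = m :: mcGreedy fuel (s.drop (j + 1)) := by
      show (match PySem.List.min? (s.take (s.length - fuel)) (fun x => x) with
        | none => []
        | some m => m :: mcGreedy fuel (s.drop (((PySem.List.index? (s.take (s.length - fuel)) m).getD 0) + 1))) = _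
      rw [hmin]
      simp only [hidx, Option.getD_some]
    have hdrop : s.drop (j + 1) = nums.drop (left + j + 1) := by
      rw [hs, List.drop_drop, ← Nat.add_assoc]
    rw [hgreedy, hdrop]
    simp

-- total A as greedy, under Pre_
lemma mostCompetitive_bad_eq_greedy (nums : List Int) (k : Int)
    (hpre : k ≤ (nums.length : Int)) :
    mostCompetitive_bad nums k = mcGreedy k.toNat nums := by
  unfold mostCompetitive_bad
  simp only [PySem.List.len_eq]
  by_cases hk1 : k = 1
  · subst hk1
    have hne : nums ≠ [] := by
      intro h
      rw [h] at hpre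
      simp at hpre
    obtain ⟨m, hmin⟩ : ∃ m, PySem.List.min? nums (fun x => x) = some m := by
      cases hm : PySem.List.min? nums (fun x => x) with
      | none => exact absurd ((PySem.List.min?_eq_none_iff _ _).mp hm) hne
      | some m => exact ⟨m, rfl⟩
    rw [if_pos rfl, hmin]
    have h1 : (1 : Int).toNat = 1 := rfl
    rw [h1]
    show [m] = (match PySem.List.min? (nums.take (nums.length - 0)) (fun x => x) with
      | none => []
      | some m => m :: mcGreedy 0 (nums.drop (((PySem.List.index? (nums.take (nums.length - 0)) m).getD 0) + 1)))
    have h2 : nums.take (nums.length - 0) = nums := by simp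
    rw [h2, hmin]
    simp [mcGreedy]
  · rw [if_neg hk1]
    by_cases hkn : k = (nums.length : Int)
    · rw [if_pos hkn]
      have h1 : k.toNat = nums.length := by omega
      rw [h1, mcGreedy_full]
    · rw [if_neg hkn]
      by_cases hk0 : k ≤ 0
      · have h1 : k.toNat = 0 := by omega
        rw [h1]
        simp [mcLoopA, mcGreedy]
      · have h1 : k = ((k.toNat : Nat) : Int) := by omega
        have h2 : (nums.length : Int) - k + 1 = (nums.length : Int) - ((k.toNat : Nat) : Int) + 1 := by omega
        rw [h2]
        have h3 : ((0 : Nat) : Int) = (0 : Int) := rfl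
        rw [← h3]
        rw [mcLoopA_eq_greedy nums k k.toNat 0 [] (by omega) (by simp; omega)]
        simp

lemma mostCompetitive_bad_alt_eq_greedy (nums : List Int) (k : Int)
    (hpre : k ≤ (nums.length : Int)) :
    mostCompetitive_bad_alt nums k = mcGreedy k.toNat nums := by
  unfold mostCompetitive_bad_alt
  simp only [PySem.List.len_eq]
  have hb : mcLoopB k nums (nums.length : Int) [] = mcRunE k 0 [] nums := by
    apply mcLoopB_eq_runE
    simp
  rw [hb]
  by_cases hk0 : k ≤ 0
  · rw [mcRunE_nonpos k hk0 0 nums]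
    have h1 : k.toNat = 0 := by omega
    rw [h1]
    simp [mcGreedy]
  · have h1 : k = ((k.toNat : Nat) : Int) := by omega
    have h2 := runE_eq_greedy k.toNat nums (by omega)
    rw [← h1] at h2
    rw [h2]
    simp

-- ===== VERDICT (by name: the statement is the Claim_ definition above) =====
theorem mostCompetitive_bad_spec : Claim_equal_mostCompetitive_bad := by
  intro nums k _ hpre
  unfold Spec_mostCompetitive_bad
  rw [mostCompetitive_bad_eq_greedy nums k hpre, mostCompetitive_bad_alt_eq_greedy nums k hpre]
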